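-- pv_equiv track=rewrite | github.com/GaneshInduri9/Leetcode-150 | Leetcode-150/Sliding-window/consective-ones-1004.py | longestOnesSlidingWindowOptimal
-- ===== SOURCE A (Python) =====
-- from typing import List
--
-- def longestOnesSlidingWindowOptimal(nums: List[int], k: int) -> int:
--     # maxlen,
--     max_len = 0
--     n = len(nums)
--     l = 0
--     r = 0
--     zeros = 0
--
--     while r < n:
--         if nums[r] == 0:
--             zeros += 1
--         if zeros > k:
--             if nums[l] == 0:
--                 zeros -= 1
--             l = l + 1
--         if zeros <= k:
--             max_len = max(max_len, r - l + 1)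
--         r = r + 1
--     return max_len
-- ===== SOURCE B (Python) =====
-- def longestOnesSlidingWindowOptimal(nums, k):
--     if k < 0:
--         return 0
--     zeros = [i for i, x in enumerate(nums) if x == 0]
--     n = len(nums)
--     if len(zeros) <= k:
--         return n
--     pad = [-1] + zeros + [n]
--     best = 0
--     for j in range(len(pad) - k - 1):
--         best = max(best, pad[j + k + 1] - pad[j] - 1)
--     return best
-- ===== Notes on version B (the rewrite author's own statement) =====
-- stated objective: faster
-- what changed: B replaces A's two-pointer sliding window (running zero counter, left pointer chasing right) by collecting the indices of the zeros once and scanning the sentinel-padded zero-index list, taking the max gap spanned by k consecutive zeros; the per-element work drops to a C-level list comprehension plus a short Python loop over the zeros only.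
import Mathlib
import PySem

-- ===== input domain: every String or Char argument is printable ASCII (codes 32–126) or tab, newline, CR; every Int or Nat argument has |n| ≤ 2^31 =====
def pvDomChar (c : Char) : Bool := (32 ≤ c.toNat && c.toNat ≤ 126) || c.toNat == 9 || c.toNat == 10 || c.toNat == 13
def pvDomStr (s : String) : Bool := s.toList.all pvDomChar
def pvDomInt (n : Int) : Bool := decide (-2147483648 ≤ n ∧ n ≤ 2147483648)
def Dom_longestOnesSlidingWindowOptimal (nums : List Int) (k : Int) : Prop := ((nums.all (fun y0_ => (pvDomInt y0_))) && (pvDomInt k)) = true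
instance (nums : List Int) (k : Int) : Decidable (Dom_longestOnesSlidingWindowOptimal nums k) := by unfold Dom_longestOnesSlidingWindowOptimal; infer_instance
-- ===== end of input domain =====

-- B replaces A's two-pointer sliding window by a scan over the list of zero positions
-- (padded with sentinels -1 and n); alternative decomposition, same linear cost.

-- ===== PORT A =====
-- the while-loop of A; l, r are the loop counters (both always nonnegative, and every
-- index access is in range when reached, so the getD default 1 is never read)
def aLoop (nums : List Int) (k : Int) (maxLen : Int) (l r : Nat) (zeros : Int) : Int :=
  if h : r < nums.length then
    -- if nums[r] == 0: zeros += 1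
    let zeros1 := if nums.getD r 1 = 0 then zeros + 1 else zeros
    -- if zeros > k: (if nums[l] == 0: zeros -= 1); l = l + 1
    let zeros2 := if k < zeros1 then (if nums.getD l 1 = 0 then zeros1 - 1 else zeros1) else zeros1
    let l2 := if k < zeros1 then l + 1 else l
    -- if zeros <= k: max_len = max(max_len, r - l + 1)
    let maxLen2 := if zeros2 ≤ k then max maxLen ((r : Int) - (l2 : Int) + 1) else maxLen
    aLoop nums k maxLen2 l2 (r + 1) zeros2
  else maxLen
  termination_by nums.length - r

def longestOnesSlidingWindowOptimal (nums : List Int) (k : Int) : Int :=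
  aLoop nums k 0 0 0 0

-- ===== PORT B =====
-- zeros = [i for i, x in enumerate(nums) if x == 0]
def zeroIdx (nums : List Int) : List Int :=
  (PySem.List.enumerate nums 0).filterMap (fun p => if p.2 = 0 then some p.1 else none)

def longestOnesSlidingWindowOptimal_alt (nums : List Int) (k : Int) : Int :=
  if k < 0 then 0
  else
    let zs := zeroIdx nums
    let n : Int := nums.length
    if (zs.length : Int) ≤ k then n
    else
      let pad := [-1] ++ zs ++ [n]
      -- for j in range(len(pad) - k - 1): best = max(best, pad[j+k+1] - pad[j] - 1)
      (PySem.List.pyRange 0 ((pad.length : Int) - k - 1) 1).foldl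
        (fun best j =>
          max best ((PySem.List.pyGet? pad (j + k + 1)).getD 0 - (PySem.List.pyGet? pad j).getD 0 - 1))
        0

-- ===== PRECONDITION & SPEC =====
def Spec_longestOnesSlidingWindowOptimal (nums : List Int) (k : Int) (out : Int) : Prop := out = longestOnesSlidingWindowOptimal_alt nums k
instance (nums : List Int) (k : Int) (out : Int) : Decidable (Spec_longestOnesSlidingWindowOptimal nums k out) := by unfold Spec_longestOnesSlidingWindowOptimal; infer_instance

-- ===== CLAIM (what is proved, stated in full; the proofs are below) =====
def Claim_equal_longestOnesSlidingWindowOptimal : Prop := ∀ (nums : List Int) (k : Int), Dom_longestOnesSlidingWindowOptimal nums k → Spec_longestOnesSlidingWindowOptimal nums k (longestOnesSlidingWindowOptimal nums k)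

-- ===== LEMMAS AND PROOFS =====

-- number of zeros among the first j elements
def Z (nums : List Int) (j : Nat) : Nat := (nums.take j).count 0

-- the window nums[i:j] contains at most k zeros
def ValidW (nums : List Int) (k : Int) (i j : Nat) : Prop :=
  i ≤ j ∧ j ≤ nums.length ∧ (Z nums j : Int) - (Z nums i : Int) ≤ k

lemma Z_mono (nums : List Int) {p q : Nat} (h : p ≤ q) : Z nums p ≤ Z nums q := by
  unfold Z
  have he : nums.take p = (nums.take q).take p := by rw [List.take_take, Nat.min_eq_left h]
  rw [he]
  exact (List.take_sublist _ _).count_le _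

lemma Z_succ (nums : List Int) {p : Nat} (h : p < nums.length) :
    Z nums (p + 1) = Z nums p + (if nums.getD p 1 = 0 then 1 else 0) := by
  unfold Z
  rw [List.take_add_one, List.count_append]
  have he : nums[p]? = some nums[p] := List.getElem?_eq_getElem h
  rw [he]
  simp only [List.getD, he, Option.getD_some, Option.toList_some]
  by_cases hz : nums[p] = 0 <;> simp [hz]

lemma getD_eq_zero_iff (nums : List Int) {p : Nat} (h : p < nums.length) :
    nums.getD p 1 = 0 ↔ nums[p]? = some 0 := by
  have he : nums[p]? = some nums[p] := List.getElem?_eq_getElem h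
  simp [List.getD, he]

lemma Z_succ_zero (nums : List Int) {p : Nat} (h : p < nums.length) (hz : nums[p]? = some 0) :
    Z nums (p + 1) = Z nums p + 1 := by
  rw [Z_succ nums h, if_pos ((getD_eq_zero_iff nums h).mpr hz)]

-- ---------- A-side ----------

def AInv (nums : List Int) (k : Int) (maxLen : Int) (l r : Nat) (zeros : Int) : Prop :=
  l ≤ r ∧ r ≤ nums.length ∧
  zeros = (Z nums r : Int) - (Z nums l : Int) ∧
  maxLen = (r : Int) - (l : Int) ∧
  (∀ i : Nat, i < l → k < (Z nums r : Int) - (Z nums i : Int)) ∧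
  (maxLen = 0 ∨ ∃ i j : Nat, ValidW nums k i j ∧ maxLen = (j : Int) - (i : Int))

lemma AInv_step (nums : List Int) (k maxLen : Int) (l r : Nat) (zeros : Int)
    (zeros1 zeros2 maxLen2 : Int) (l2 : Nat)
    (h : r < nums.length)
    (hz1 : zeros1 = if nums.getD r 1 = 0 then zeros + 1 else zeros)
    (hz2 : zeros2 = if k < zeros1 then (if nums.getD l 1 = 0 then zeros1 - 1 else zeros1) else zeros1)
    (hl2 : l2 = if k < zeros1 then l + 1 else l)
    (hm2 : maxLen2 = if zeros2 ≤ k then max maxLen ((r : Int) - (l2 : Int) + 1) else maxLen)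
    (hI : AInv nums k maxLen l r zeros) :
    AInv nums k maxLen2 l2 (r + 1) zeros2 := by
  obtain ⟨hlr, hrn, hz, hm, hI4, hach⟩ := hI
  have hln : l < nums.length := lt_of_le_of_lt hlr h
  have hZr := Z_succ nums h
  have hZl := Z_succ nums hln
  have hZlr : Z nums l ≤ Z nums r := Z_mono nums hlr
  have hl2r : l2 ≤ r + 1 := by rw [hl2]; split_ifs <;> omega
  have hz2' : zeros2 = (Z nums (r + 1) : Int) - (Z nums l2 : Int) := by
    rw [hz2, hl2, hz1] at *
    split_ifs at * <;> omega
  have hm2' : maxLen2 = ((r : Int) + 1) - (l2 : Int) := by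
    rw [hm2, hl2] at *
    by_cases hc : zeros2 ≤ k
    · rw [if_pos hc]
      split_ifs with hmv
      · have : max maxLen ((r : Int) - ((l + 1 : Nat) : Int) + 1) = maxLen := by
          apply max_eq_left; push_cast; omega
        rw [this]; push_cast; omega
      · have : max maxLen ((r : Int) - ((l : Nat) : Int) + 1) = (r : Int) - (l : Int) + 1 := by
          apply max_eq_right; omega
        rw [this]; omega
    · rw [if_neg hc]
      -- no update: must be the moved case (otherwise zeros2 = zeros1 ≤ k)
      by_cases hmv : k < zeros1
      · rw [if_pos hmv]; push_cast; omega
      · exfalso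
        rw [hz2, if_neg hmv] at hc
        omega
  refine ⟨hl2r, by omega, hz2', hm2', ?_, ?_⟩
  · intro i hi
    have hZir : Z nums i ≤ Z nums (r + 1) := Z_mono nums (by omega)
    have hZirr : Z nums i ≤ Z nums r := Z_mono nums (by rw [hl2] at hi; split_ifs at hi <;> omega)
    rw [hl2] at hi
    by_cases hmv : k < zeros1
    · rw [if_pos hmv] at hi
      rcases Nat.lt_succ_iff_lt_or_eq.mp hi with hi' | hi'
      · have := hI4 i hi'
        omega
      · subst hi'
        rw [hz1] at hmv
        split_ifs at hmv hZr <;> omega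
    · rw [if_neg hmv] at hi
      have := hI4 i hi
      omega
  · by_cases hc : zeros2 ≤ k
    · refine Or.inr ⟨l2, r + 1, ⟨hl2r, by omega, by omega⟩, by push_cast at hm2' ⊢; omega⟩
    · rw [hm2, if_neg hc]
      exact hach

lemma aLoop_ge (nums : List Int) (k : Int) :
    ∀ (fuel : Nat) (maxLen : Int) (l r : Nat) (zeros : Int), nums.length - r = fuel →
      maxLen ≤ aLoop nums k maxLen l r zeros := by
  intro fuel
  induction fuel with
  | zero =>
    intro maxLen l r zeros hf
    rw [aLoop]
    simp only [dif_neg (show ¬ r < nums.length by omega)]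
    exact le_refl _
  | succ fuel ih =>
    intro maxLen l r zeros hf
    have h : r < nums.length := by omega
    rw [aLoop]
    simp only [dif_pos h]
    refine le_trans ?_ (ih _ _ _ _ (by omega))
    split_ifs <;> simp

lemma aLoop_main (nums : List Int) (k : Int) :
    ∀ (fuel : Nat) (maxLen : Int) (l r : Nat) (zeros : Int), nums.length - r = fuel →
      AInv nums k maxLen l r zeros →
      (0 ≤ aLoop nums k maxLen l r zeros) ∧
      (∀ i j : Nat, ValidW nums k i j → r ≤ j →
        (j : Int) - (i : Int) ≤ aLoop nums k maxLen l r zeros) ∧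
      (aLoop nums k maxLen l r zeros = 0 ∨
        ∃ i j : Nat, ValidW nums k i j ∧ aLoop nums k maxLen l r zeros = (j : Int) - (i : Int)) := by
  intro fuel
  induction fuel with
  | zero =>
    intro maxLen l r zeros hf hI
    obtain ⟨hlr, hrn, hz, hm, hI4, hach⟩ := hI
    have hrn' : r = nums.length := by omega
    rw [aLoop]
    simp only [dif_neg (show ¬ r < nums.length by omega)]
    refine ⟨by omega, ?_, hach⟩
    intro i j ⟨hij, hjn, hv⟩ hrj
    have hj : j = nums.length := by omega
    subst hj
    have hil : l ≤ i := by
      by_contra hc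
      have := hI4 i (by omega)
      rw [hrn'] at this
      omega
    have := Z_mono nums hil
    omega
  | succ fuel ih =>
    intro maxLen l r zeros hf hI
    have h : r < nums.length := by omega
    have hfu : nums.length - (r + 1) = fuel := by omega
    have hI' := AInv_step nums k maxLen l r zeros _ _ _ _ h rfl rfl rfl rfl hI
    rw [aLoop]
    simp only [dif_pos h]
    obtain ⟨h0, hub, hach⟩ := ih _ _ _ _ hfu hI'
    refine ⟨h0, ?_, hach⟩
    intro i j hv hrj
    rcases Nat.lt_or_ge r j with hlt | hge
    · exact hub i j hv (by omega)
    · have hjr : j = r := by omega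
      obtain ⟨hlr, hrn, hz, hm, hI4, _⟩ := hI
      obtain ⟨hij, hjn, hvv⟩ := hv
      rw [hjr] at hvv
      have hil : l ≤ i := by
        by_contra hc
        have := hI4 i (by omega)
        omega
      have hZli : Z nums l ≤ Z nums i := Z_mono nums hil
      have hb : ((j : Nat) : Int) - (i : Int) ≤ maxLen := by
        clear h0 hub hach hI' ih
        omega
      have hstep : maxLen ≤ (if (if k < (if nums.getD r 1 = 0 then zeros + 1 else zeros) then (if nums.getD l 1 = 0 then (if nums.getD r 1 = 0 then zeros + 1 else zeros) - 1 else (if nums.getD r 1 = 0 then zeros + 1 else zeros)) else (if nums.getD r 1 = 0 then zeros + 1 else zeros)) ≤ k then max maxLen ((r : Int) - ((if k < (if nums.getD r 1 = 0 then zeros + 1 else zeros) then l + 1 else l : Nat) : Int) + 1) else maxLen) := by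
        split_ifs <;> simp
      exact le_trans hb (le_trans hstep (aLoop_ge nums k fuel _ _ (r + 1) _ hfu))

lemma A_props (nums : List Int) (k : Int) :
    (0 ≤ longestOnesSlidingWindowOptimal nums k) ∧
    (∀ i j : Nat, ValidW nums k i j →
      (j : Int) - (i : Int) ≤ longestOnesSlidingWindowOptimal nums k) ∧
    (longestOnesSlidingWindowOptimal nums k = 0 ∨
      ∃ i j : Nat, ValidW nums k i j ∧ longestOnesSlidingWindowOptimal nums k = (j : Int) - (i : Int)) := by
  have hI : AInv nums k 0 0 0 0 := by
    refine ⟨le_refl _, Nat.zero_le _, by simp, by simp, by omega, Or.inl rfl⟩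
  have := aLoop_main nums k (nums.length - 0) 0 0 0 0 rfl hI
  unfold longestOnesSlidingWindowOptimal
  exact ⟨this.1, fun i j hv => this.2.1 i j hv (Nat.zero_le _), this.2.2⟩

-- ---------- B-side ----------

lemma bFoldAch (f : Int → Int) :
    ∀ (l : List Int) (a : Int),
      l.foldl (fun acc x => max acc (f x)) a = a ∨
      ∃ x ∈ l, l.foldl (fun acc x => max acc (f x)) a = f x := by
  intro l
  induction l with
  | nil => intro a; exact Or.inl rfl
  | cons x l ih =>
    intro a
    rcases ih (max a (f x)) with h | ⟨y, hy, he⟩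
    · rcases le_total (f x) a with hc | hc
      · rw [List.foldl_cons] at *
        rw [h, max_eq_left hc]
        exact Or.inl rfl
      · rw [List.foldl_cons] at *
        rw [h, max_eq_right hc]
        exact Or.inr ⟨x, List.mem_cons_self, rfl⟩
    · exact Or.inr ⟨y, List.mem_cons_of_mem _ hy, he⟩

lemma zIdx_get :
    ∀ (xs : List Int) (s : Int) (t : Nat) (v : Int),
      ((PySem.List.enumerate xs s).filterMap (fun p => if p.2 = 0 then some p.1 else none))[t]? = some v ↔
      ∃ p : Nat, p < xs.length ∧ v = s + p ∧ xs[p]? = some 0 ∧ (xs.take p).count 0 = t := by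
  intro xs
  induction xs with
  | nil =>
    intro s t v
    simp [PySem.List.enumerate_nil]
  | cons x xs ih =>
    intro s t v
    rw [PySem.List.enumerate_cons]
    by_cases hx : x = (0 : Int)
    · subst hx
      rw [List.filterMap_cons_some (b := s) (by simp)]
      cases t with
      | zero =>
        simp only [List.getElem?_cons_zero]
        constructor
        · intro hv
          have hv' : v = s := (Option.some_inj.mp hv).symm
          exact ⟨0, by simp, by simp [hv'], by simp, by simp⟩
        · rintro ⟨p, hp, hv, hg, hc⟩
          cases p with
          | zero => simp [hv]
          | succ p =>
            exfalso
            simp [List.take_succ_cons] at hc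
      | succ t =>
        rw [List.getElem?_cons_succ, ih]
        constructor
        · rintro ⟨p, hp, hv, hg, hc⟩
          refine ⟨p + 1, by simpa using Nat.succ_lt_succ hp, by push_cast; omega, by simpa using hg, ?_⟩
          simp [List.take_succ_cons, hc]
        · rintro ⟨p, hp, hv, hg, hc⟩
          cases p with
          | zero => simp [List.take_zero] at hc
          | succ p =>
            refine ⟨p, by simpa using hp, by push_cast at hv ⊢; omega, by simpa using hg, ?_⟩
            simp [List.take_succ_cons] at hc
            omega
    · rw [List.filterMap_cons_none (by simp [hx]), ih]
      constructor
      · rintro ⟨p, hp, hv, hg, hc⟩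
        refine ⟨p + 1, by simpa using Nat.succ_lt_succ hp, by push_cast; omega, by simpa using hg, ?_⟩
        simp [List.take_succ_cons, hx, hc]
      · rintro ⟨p, hp, hv, hg, hc⟩
        cases p with
        | zero =>
          exfalso
          simp at hg
          exact hx hg
        | succ p =>
          refine ⟨p, by simpa using hp, by push_cast at hv ⊢; omega, by simpa using hg, ?_⟩
          simp [List.take_succ_cons, hx] at hc
          exact hc

lemma zIdx_length :
    ∀ (xs : List Int) (s : Int),
      ((PySem.List.enumerate xs s).filterMap (fun p => if p.2 = 0 then some p.1 else none)).length = xs.count 0 := by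
  intro xs
  induction xs with
  | nil => intro s; simp [PySem.List.enumerate_nil]
  | cons x xs ih =>
    intro s
    rw [PySem.List.enumerate_cons, List.filterMap_cons]
    by_cases hx : x = (0 : Int)
    · simp [hx, ih]
    · simp [hx, ih]

lemma zeroIdx_get (nums : List Int) (t : Nat) (v : Int) :
    (zeroIdx nums)[t]? = some v ↔
    ∃ p : Nat, p < nums.length ∧ v = (p : Int) ∧ nums[p]? = some 0 ∧ Z nums p = t := by
  unfold zeroIdx Z
  rw [zIdx_get]
  constructor
  · rintro ⟨p, hp, hv, hg, hc⟩
    exact ⟨p, hp, by omega, hg, hc⟩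
  · rintro ⟨p, hp, hv, hg, hc⟩
    exact ⟨p, hp, by omega, hg, hc⟩

lemma zeroIdx_length (nums : List Int) : (zeroIdx nums).length = Z nums nums.length := by
  unfold zeroIdx Z
  rw [zIdx_length, List.take_length]

lemma alt_eval (nums : List Int) (k : Int) (hk : ¬ k < 0) :
    longestOnesSlidingWindowOptimal_alt nums k =
      (if ((zeroIdx nums).length : Int) ≤ k then ((nums.length : Nat) : Int) else
        (PySem.List.pyRange 0 (((([-1] ++ zeroIdx nums ++ [((nums.length : Nat) : Int)]).length : Nat) : Int) - k - 1) 1).foldl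
          (fun best j => max best ((PySem.List.pyGet? ([-1] ++ zeroIdx nums ++ [((nums.length : Nat) : Int)]) (j + k + 1)).getD 0 -
            (PySem.List.pyGet? ([-1] ++ zeroIdx nums ++ [((nums.length : Nat) : Int)]) j).getD 0 - 1)) 0) := by
  unfold longestOnesSlidingWindowOptimal_alt
  rw [if_neg hk]

lemma B_props (nums : List Int) (k : Int) :
    (0 ≤ longestOnesSlidingWindowOptimal_alt nums k) ∧
    (∀ i j : Nat, ValidW nums k i j →
      (j : Int) - (i : Int) ≤ longestOnesSlidingWindowOptimal_alt nums k) ∧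
    (longestOnesSlidingWindowOptimal_alt nums k = 0 ∨
      ∃ i j : Nat, ValidW nums k i j ∧ longestOnesSlidingWindowOptimal_alt nums k = (j : Int) - (i : Int)) := by
  by_cases hk : k < 0
  · have he : longestOnesSlidingWindowOptimal_alt nums k = 0 := by
      unfold longestOnesSlidingWindowOptimal_alt
      rw [if_pos hk]
    rw [he]
    refine ⟨le_refl _, ?_, Or.inl rfl⟩
    intro i j ⟨hij, hjn, hv⟩
    have := Z_mono nums hij
    omega
  · rw [alt_eval nums k hk]
    have hZn := zeroIdx_length nums
    by_cases hm : ((zeroIdx nums).length : Int) ≤ k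
    · rw [if_pos hm]
      refine ⟨by exact_mod_cast Int.natCast_nonneg nums.length, ?_, ?_⟩
      · intro i j ⟨hij, hjn, hv⟩
        have hj : (j : Int) ≤ (nums.length : Int) := by exact_mod_cast hjn
        omega
      · refine Or.inr ⟨0, nums.length, ⟨Nat.zero_le _, le_refl _, ?_⟩, by simp⟩
        have hZ0 : Z nums 0 = 0 := by simp [Z]
        rw [hZ0, hZn] at *
        omega
    · rw [if_neg hm]
      have hk0 : 0 ≤ k := not_lt.mp hk
      obtain ⟨k', rfl⟩ : ∃ k' : Nat, (k' : Int) = k := ⟨k.toNat, Int.toNat_of_nonneg hk0⟩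
      set zs := zeroIdx nums with hzsdef
      set m := zs.length with hmdef
      have hkm' : k' < m := by
        have : (k' : Int) < (m : Int) := not_le.mp hm
        exact_mod_cast this
      set pad := [-1] ++ zs ++ [((nums.length : Nat) : Int)] with hpaddef
      have hpadlen : pad.length = m + 2 := by
        simp [hpaddef, hmdef]
      have hpad0 : pad[(0 : Nat)]? = some (-1) := by
        simp [hpaddef]
      have hpadmid : ∀ t : Nat, t < m → pad[(t + 1)]? = zs[t]? := by
        intro t ht
        show ((-1) :: (zs ++ [((nums.length : Nat) : Int)]))[(t + 1)]? = zs[t]?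
        rw [List.getElem?_cons_succ, List.getElem?_append_left ht]
      have hpadlast : pad[(m + 1)]? = some ((nums.length : Nat) : Int) := by
        show ((-1) :: (zs ++ [((nums.length : Nat) : Int)]))[(m + 1)]? = _
        rw [List.getElem?_cons_succ, List.getElem?_append_right (le_refl m)]
        simp [hmdef]
      -- value of the loop body at a natural index with both pad cells known
      have hfval : ∀ (jn : Nat) (a b : Int), pad[jn]? = some a → pad[(jn + k' + 1)]? = some b →
          (PySem.List.pyGet? pad ((jn : Int) + (k' : Int) + 1)).getD 0 -
            (PySem.List.pyGet? pad (jn : Int)).getD 0 - 1 = b - a - 1 := by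
        intro jn a b ha hb
        have h1 : ((jn : Int) + (k' : Int) + 1) = ((jn + k' + 1 : Nat) : Int) := by push_cast; ring
        rw [h1, PySem.List.pyGet?_natCast, PySem.List.pyGet?_natCast, ha, hb]
        simp
      have hmem : ∀ jn : Nat, jn ≤ m - k' →
          ((jn : Nat) : Int) ∈ PySem.List.pyRange 0 (((pad.length : Nat) : Int) - (k' : Int) - 1) 1 := by
        intro jn hjn
        rw [PySem.List.mem_pyRange_one]
        constructor
        · exact_mod_cast Int.natCast_nonneg jn
        · rw [hpadlen]
          push_cast
          omega
      -- the zero list entry t, as a position in nums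
      have hzs : ∀ t : Nat, t < m → ∃ p : Nat, zs[t]? = some ((p : Nat) : Int) ∧
          p < nums.length ∧ nums[p]? = some 0 ∧ Z nums p = t := by
        intro t ht
        have hsome : zs[t]? = some zs[t] := List.getElem?_eq_getElem ht
        obtain ⟨p, hp, hpv, hpz, hZp⟩ := (zeroIdx_get nums t zs[t]).mp hsome
        exact ⟨p, by rw [hsome, hpv], hp, hpz, hZp⟩
      obtain ⟨hge0, hub⟩ := PySem.List.le_foldl_max_int
        (PySem.List.pyRange 0 (((pad.length : Nat) : Int) - (k' : Int) - 1) 1)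
        (fun j => (PySem.List.pyGet? pad (j + (k' : Int) + 1)).getD 0 -
          (PySem.List.pyGet? pad j).getD 0 - 1) 0
      refine ⟨hge0, ?_, ?_⟩
      · -- upper bound: every valid window fits below some scanned gap
        intro i e ⟨hie, hen, hv⟩
        set js : Nat := min (Z nums i) (m - k') with hjs
        have hj1 : js ≤ Z nums i := min_le_left _ _
        have hj2 : js ≤ m - k' := min_le_right _ _
        have hj3 : js = Z nums i ∨ js = m - k' := min_choice _ _
        have hA : ∃ a, pad[js]? = some a ∧ a < (i : Int) := by
          cases hj0 : js with
          | zero => exact ⟨-1, hpad0, by omega⟩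
          | succ t =>
            have ht : t < m := by omega
            obtain ⟨p, hpg, hp, hpz, hZp⟩ := hzs t ht
            have hti : t < Z nums i := by omega
            have hpi : p < i := by
              by_contra hc
              have := Z_mono nums (show i ≤ p by omega)
              omega
            exact ⟨(p : Int), by rw [hpadmid t ht, hpg], by exact_mod_cast hpi⟩
        have hB : ∃ b, pad[(js + k' + 1)]? = some b ∧ (e : Int) ≤ b := by
          by_cases hend : js + k' = m
          · refine ⟨((nums.length : Nat) : Int), ?_, by exact_mod_cast hen⟩
            rw [show js + k' + 1 = m + 1 by omega]
            exact hpadlast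
          · have hlt : js + k' < m := by omega
            have hjsi : js = Z nums i := by
              rcases hj3 with h | h
              · exact h
              · omega
            obtain ⟨q, hqg, hq, hqz, hZq⟩ := hzs (js + k') hlt
            refine ⟨(q : Int), by rw [hpadmid _ hlt, hqg], ?_⟩
            have heq : e ≤ q := by
              by_contra hc
              have hq1 : Z nums (q + 1) = Z nums q + 1 := Z_succ_zero nums hq hqz
              rcases le_or_gt i q with hiq | hiq
              · have := Z_mono nums (show q + 1 ≤ e by omega)
                omega
              · have := Z_mono nums (show q + 1 ≤ i by omega)
                omega
            exact_mod_cast heq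
        obtain ⟨a, ha, hai⟩ := hA
        obtain ⟨b, hb, heb⟩ := hB
        have hle := hub ((js : Nat) : Int) (hmem js hj2)
        rw [hfval js a b ha hb] at hle
        omega
      · -- achieved: the returned value is some scanned gap, which is a valid window
        rcases bFoldAch
          (fun j => (PySem.List.pyGet? pad (j + (k' : Int) + 1)).getD 0 -
            (PySem.List.pyGet? pad j).getD 0 - 1)
          (PySem.List.pyRange 0 (((pad.length : Nat) : Int) - (k' : Int) - 1) 1) 0 with h0 | ⟨j, hjmem, hje⟩
        · exact Or.inl h0
        · right
          rw [PySem.List.mem_pyRange_one] at hjmem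
          obtain ⟨jn, rfl⟩ : ∃ jn : Nat, ((jn : Nat) : Int) = j :=
            ⟨j.toNat, Int.toNat_of_nonneg hjmem.1⟩
          have hjn : jn ≤ m - k' := by
            have := hjmem.2
            rw [hpadlen] at this
            push_cast at this
            omega
          rw [hje]
          cases hjn0 : jn with
          | zero =>
            obtain ⟨p, hpg, hp, hpz, hZp⟩ := hzs k' hkm'
            have hb : pad[(0 + k' + 1)]? = some ((p : Nat) : Int) := by
              rw [show 0 + k' + 1 = k' + 1 by omega, hpadmid k' hkm', hpg]
            refine ⟨0, p, ⟨Nat.zero_le _, le_of_lt hp, ?_⟩, ?_⟩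
            · have hZ0 : Z nums 0 = 0 := by simp [Z]
              omega
            · rw [hfval 0 (-1) ((p : Nat) : Int) hpad0 hb]
              push_cast
              ring
          | succ t =>
            have ht : t < m := by omega
            obtain ⟨p, hpg, hp, hpz, hZp⟩ := hzs t ht
            have ha : pad[(t + 1)]? = some ((p : Nat) : Int) := by rw [hpadmid t ht, hpg]
            have hZp1 : Z nums (p + 1) = Z nums p + 1 := Z_succ_zero nums hp hpz
            by_cases hend : jn + k' = m
            · have hb : pad[(t + 1 + k' + 1)]? = some ((nums.length : Nat) : Int) := by
                rw [show t + 1 + k' + 1 = m + 1 by omega]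
                exact hpadlast
              refine ⟨p + 1, nums.length, ⟨by omega, le_refl _, by omega⟩, ?_⟩
              rw [hfval (t + 1) _ _ ha hb]
              push_cast
              ring
            · have hlt : jn + k' < m := by omega
              have hlt' : t + 1 + k' < m := by omega
              obtain ⟨q, hqg, hq, hqz, hZq⟩ := hzs (t + 1 + k') hlt'
              have hb : pad[(t + 1 + k' + 1)]? = some ((q : Nat) : Int) := by
                rw [hpadmid _ hlt', hqg]
              have hpq : p < q := by
                by_contra hc
                have := Z_mono nums (show q ≤ p by omega)
                omega
              refine ⟨p + 1, q, ⟨by omega, le_of_lt hq, by omega⟩, ?_⟩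
              rw [hfval (t + 1) _ _ ha hb]
              push_cast
              ring

-- ===== VERDICT (by name: the statement is the Claim_ definition above) =====
theorem longestOnesSlidingWindowOptimal_spec : Claim_equal_longestOnesSlidingWindowOptimal := by
  intro nums k _
  unfold Spec_longestOnesSlidingWindowOptimal
  obtain ⟨ha0, haub, haach⟩ := A_props nums k
  obtain ⟨hb0, hbub, hbach⟩ := B_props nums k
  apply le_antisymm
  · rcases haach with h | ⟨i, j, hv, he⟩
    · omega
    · rw [he]; exact hbub i j hv
  · rcases hbach with h | ⟨i, j, hv, he⟩
    · omega
    · rw [he]; exact haub i j hv
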